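-- pv_equiv track=rewrite | github.com/uriahf/rtichoke_python | src/rtichoke/processing/plotly_helper_functions.py | _bold_hover_metrics
-- ===== SOURCE A (Python) =====
-- from typing import Any, Dict, Union, Sequence, cast
--
-- _HOVER_LABELS = {
--     "false_positive_rate": "1 - Specificity (FPR)",
--     "sensitivity": "Sensitivity",
--     "specificity": "Specificity",
--     "lift": "Lift",
--     "ppv": "PPV",
--     "npv": "NPV",
--     "net_benefit": "NB",
--     "net_benefit_interventions_avoided": "Interventions Avoided (per 100)",
--     "chosen_cutoff": "Prob. Threshold",
--     "ppcr": "Predicted Positives",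
-- }
--
-- def _bold_hover_metrics(text: str, metrics: Sequence[str]) -> str:
--     lines = text.split("<br>")
--     for metric in metrics:
--         label = _HOVER_LABELS.get(metric, metric)
--         lines = [
--             f"<b>{line}</b>" if label in line and "<b>" not in line else line
--             for line in lines
--         ]
--     return "<br>".join(lines)
-- ===== SOURCE B (Python) =====
-- from typing import Sequence
--
-- _HOVER_LABELS = {
--     "false_positive_rate": "1 - Specificity (FPR)",
--     "sensitivity": "Sensitivity",
--     "specificity": "Specificity",
--     "lift": "Lift",
--     "ppv": "PPV",
--     "npv": "NPV",
--     "net_benefit": "NB",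
--     "net_benefit_interventions_avoided": "Interventions Avoided (per 100)",
--     "chosen_cutoff": "Prob. Threshold",
--     "ppcr": "Predicted Positives",
-- }
--
--
-- def _bold_hover_metrics(text: str, metrics: Sequence[str]) -> str:
--     labels = [_HOVER_LABELS.get(m, m) for m in metrics]
--     return "<br>".join(
--         f"<b>{line}</b>"
--         if "<b>" not in line and any(label in line for label in labels)
--         else line
--         for line in text.split("<br>")
--     )
-- ===== Notes on version B (the rewrite author's own statement) =====
-- stated objective: faster
-- what changed: B swaps the loop nesting: instead of rebuilding the whole lines list once per metric (M full passes, each allocating a fresh list and re-scanning every line), B resolves all labels once and makes a single pass over the lines, bolding a line iff it has no '<b>' and any label occurs in it (with any() short-circuiting), joining once at the end.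
import Mathlib
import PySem

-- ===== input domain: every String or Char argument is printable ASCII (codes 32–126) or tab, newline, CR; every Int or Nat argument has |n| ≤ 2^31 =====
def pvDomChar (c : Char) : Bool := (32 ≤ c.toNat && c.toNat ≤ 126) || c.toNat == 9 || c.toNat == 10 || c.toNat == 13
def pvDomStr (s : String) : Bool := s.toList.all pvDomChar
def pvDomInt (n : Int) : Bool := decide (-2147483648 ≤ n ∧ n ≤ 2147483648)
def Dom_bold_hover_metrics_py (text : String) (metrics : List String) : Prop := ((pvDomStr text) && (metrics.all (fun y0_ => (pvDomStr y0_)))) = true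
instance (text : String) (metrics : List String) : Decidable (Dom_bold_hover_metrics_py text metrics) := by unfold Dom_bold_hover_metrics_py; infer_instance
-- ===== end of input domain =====

-- B resolves all metric labels once and bolds lines in a single pass (A rebuilds the lines list once per metric); equal output proved.


-- ===== PORT A =====
-- the module constant _HOVER_LABELS
def pvHoverLabels : PySem.Dict String String := PySem.Dict.ofList
  [ ("false_positive_rate", "1 - Specificity (FPR)"),
    ("sensitivity", "Sensitivity"),
    ("specificity", "Specificity"),
    ("lift", "Lift"),
    ("ppv", "PPV"),
    ("npv", "NPV"),
    ("net_benefit", "NB"),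
    ("net_benefit_interventions_avoided", "Interventions Avoided (per 100)"),
    ("chosen_cutoff", "Prob. Threshold"),
    ("ppcr", "Predicted Positives") ]

-- f"<b>{line}</b>"  (string concatenation, exact: built on the code-point list)
def pvBold (line : String) : String := String.ofList ("<b>".toList ++ line.toList ++ "</b>".toList)

def bold_hover_metrics_py (text : String) (metrics : List String) : String :=
  -- lines = text.split("<br>")  ("<br>" ≠ "", so split? is always some)
  let lines := (PySem.Str.split? text "<br>").getD []
  let lines := metrics.foldl
    (fun lines metric =>
      let label := (pvHoverLabels.get? metric).getD metric
      lines.map (fun line =>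
        if PySem.Str.isIn label line && !PySem.Str.isIn "<b>" line then pvBold line else line))
    lines
  PySem.Str.join "<br>" lines

-- ===== PORT B =====
def bold_hover_metrics_py_alt (text : String) (metrics : List String) : String :=
  let labels := metrics.map (fun m => (pvHoverLabels.get? m).getD m)
  PySem.Str.join "<br>"
    (((PySem.Str.split? text "<br>").getD []).map (fun line =>
      if !PySem.Str.isIn "<b>" line && labels.any (fun label => PySem.Str.isIn label line)
      then pvBold line else line))

-- ===== PRECONDITION & SPEC =====
def Spec_bold_hover_metrics_py (text : String) (metrics : List String) (out : String) : Prop := out = bold_hover_metrics_py_alt text metrics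
instance (text : String) (metrics : List String) (out : String) : Decidable (Spec_bold_hover_metrics_py text metrics out) := by unfold Spec_bold_hover_metrics_py; infer_instance

-- ===== CLAIM (what is proved, stated in full; the proofs are below) =====
def Claim_equal_bold_hover_metrics_py : Prop := ∀ (text : String) (metrics : List String), Dom_bold_hover_metrics_py text metrics → Spec_bold_hover_metrics_py text metrics (bold_hover_metrics_py text metrics)

-- ===== LEMMAS AND PROOFS =====

-- a freshly bolded line contains "<b>"
theorem pv_isIn_b_bold (line : String) : PySem.Str.isIn "<b>" (pvBold line) = true := by
  rw [PySem.Str.isIn_iff_infix]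
  simp only [pvBold, String.toList_ofList]
  exact (List.prefix_append _ _).isInfix

-- a fold of per-metric maps over the lines list is a single map of the per-line fold
theorem pv_foldl_map (ms : List String) (g : String → String → String) (ls : List String) :
    ms.foldl (fun l m => l.map (g m)) ls = ls.map (fun x => ms.foldl (fun x m => g m x) x) := by
  induction ms generalizing ls with
  | nil => simp
  | cons m ms ih =>
    simp only [List.foldl_cons, ih, List.map_map]
    rfl

-- per line, A's fold across metrics equals B's single test (abstract: f = bold, hasB = contains "<b>", test m = contains m's label; hf: a bolded line contains "<b>")
theorem pv_perline (f : String → String) (hasB : String → Bool) (test : String → String → Bool)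
    (hf : ∀ l, hasB (f l) = true) (ms : List String) (line : String) :
    ms.foldl (fun l m => if test m l && !hasB l then f l else l) line
    = if !hasB line && ms.any (fun m => test m line) then f line else line := by
  induction ms generalizing line with
  | nil => simp
  | cons m ms ih =>
    simp only [List.foldl_cons, List.any_cons]
    by_cases hb : hasB line = true
    · simp only [hb, Bool.not_true, Bool.and_false, Bool.false_eq_true, if_false, ih,
        Bool.false_and]
    · rw [Bool.not_eq_true] at hb
      by_cases hm : test m line = true
      · simp only [hb, hm, Bool.not_false, Bool.and_true, if_true, ih, hf, Bool.not_true,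
          Bool.false_and, Bool.false_eq_true, if_false, Bool.true_or]
      · rw [Bool.not_eq_true] at hm
        simp only [hb, hm, Bool.not_false, Bool.and_true, Bool.false_eq_true, if_false, ih,
          Bool.false_or, Bool.true_and]

-- ===== VERDICT (by name: the statement is the Claim_ definition above) =====
theorem bold_hover_metrics_py_spec : Claim_equal_bold_hover_metrics_py := by
  intro text metrics _
  unfold Spec_bold_hover_metrics_py bold_hover_metrics_py bold_hover_metrics_py_alt
  simp only [pv_foldl_map]
  rw [show (fun x => List.foldl
        (fun l m => if PySem.Str.isIn ((pvHoverLabels.get? m).getD m) l && !PySem.Str.isIn "<b>" l then pvBold l else l)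
        x metrics)
      = (fun line => if !PySem.Str.isIn "<b>" line && metrics.any (fun m => PySem.Str.isIn ((pvHoverLabels.get? m).getD m) line) then pvBold line else line)
    from funext fun line => pv_perline pvBold (PySem.Str.isIn "<b>")
      (fun m l => PySem.Str.isIn ((pvHoverLabels.get? m).getD m) l) pv_isIn_b_bold metrics line]
  simp only [List.any_map, Function.comp_def]
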